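-- pv_equiv track=rewrite | github.com/shubham2704/competetive_coding | codewars/fusionChamberShutdown.py | burner
-- ===== SOURCE A (Python) =====
-- def burner(c,h,o):
--     water = co2 = methane = 0
--
--     while h > 1 and o > 0:
--         water += 1
--         h -= 2
--         o -= 1
--
--     while c > 0 and o > 1:
--         co2 += 1
--         c -= 1
--         o -= 2
--
--     while c > 0 and h > 3:
--         methane += 1
--         c -= 1
--         h -= 4
--
--     return water,co2,methane
-- ===== SOURCE B (Python) =====
-- def burner(c, h, o):
--     water = max(0, min(h // 2, o))
--     h -= 2 * water
--     o -= water
--     co2 = max(0, min(c, o // 2))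
--     c -= co2
--     methane = max(0, min(c, h // 4))
--     return water, co2, methane
-- ===== Notes on version B (the rewrite author's own statement) =====
-- stated objective: faster
-- what changed: Each of A's three unit-step counting loops is replaced by a closed-form count max(0, min(available, floor-division quotient)), so B runs in O(1) regardless of the atom counts.
import Mathlib
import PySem

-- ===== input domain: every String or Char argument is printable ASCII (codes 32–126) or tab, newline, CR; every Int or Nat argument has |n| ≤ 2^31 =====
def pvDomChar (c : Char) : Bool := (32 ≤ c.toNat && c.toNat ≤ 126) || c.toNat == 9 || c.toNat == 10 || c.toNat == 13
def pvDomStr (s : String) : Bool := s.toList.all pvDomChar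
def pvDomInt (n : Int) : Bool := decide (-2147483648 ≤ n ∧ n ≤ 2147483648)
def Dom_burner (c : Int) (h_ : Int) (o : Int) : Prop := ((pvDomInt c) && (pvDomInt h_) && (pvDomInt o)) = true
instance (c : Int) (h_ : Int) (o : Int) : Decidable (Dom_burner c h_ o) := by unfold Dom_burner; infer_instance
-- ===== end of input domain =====

-- B replaces A's three unit-step counting loops by closed-form max/min/floor-division formulas (asymptotically faster: O(1) vs O(|h|+|o|+|c|)).


-- ===== PORT A =====
-- while h > 1 and o > 0: water += 1; h -= 2; o -= 1
def burnerLoop1 (h o water : Int) : Int × Int × Int :=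
  if h > 1 ∧ o > 0 then burnerLoop1 (h - 2) (o - 1) (water + 1) else (h, o, water)
termination_by o.toNat
decreasing_by omega

-- while c > 0 and o > 1: co2 += 1; c -= 1; o -= 2
def burnerLoop2 (c o co2 : Int) : Int × Int × Int :=
  if c > 0 ∧ o > 1 then burnerLoop2 (c - 1) (o - 2) (co2 + 1) else (c, o, co2)
termination_by c.toNat
decreasing_by omega

-- while c > 0 and h > 3: methane += 1; c -= 1; h -= 4
def burnerLoop3 (c h methane : Int) : Int × Int × Int :=
  if c > 0 ∧ h > 3 then burnerLoop3 (c - 1) (h - 4) (methane + 1) else (c, h, methane)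
termination_by c.toNat
decreasing_by omega

def burner (c : Int) (h_ : Int) (o : Int) : List Int :=
  let r1 := burnerLoop1 h_ o 0
  let r2 := burnerLoop2 c r1.2.1 0
  let r3 := burnerLoop3 r2.1 r1.1 0
  [r1.2.2, r2.2.2, r3.2.2]

-- ===== PORT B =====
def burner_alt (c : Int) (h_ : Int) (o : Int) : List Int :=
  let water := max 0 (min (PySem.Int.floordiv h_ 2) o)
  let h := h_ - 2 * water
  let o' := o - water
  let co2 := max 0 (min c (PySem.Int.floordiv o' 2))
  let c' := c - co2
  let methane := max 0 (min c' (PySem.Int.floordiv h 4))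
  [water, co2, methane]

-- ===== PRECONDITION & SPEC =====
def Spec_burner (c : Int) (h_ : Int) (o : Int) (out : List Int) : Prop := out = burner_alt c h_ o
instance (c : Int) (h_ : Int) (o : Int) (out : List Int) : Decidable (Spec_burner c h_ o out) := by unfold Spec_burner; infer_instance

-- ===== CLAIM (what is proved, stated in full; the proofs are below) =====
def Claim_equal_burner : Prop := ∀ (c : Int) (h_ : Int) (o : Int), Dom_burner c h_ o → Spec_burner c h_ o (burner c h_ o)

-- ===== LEMMAS AND PROOFS =====
theorem fdiv_bounds (a b : Int) (hb : 0 < b) :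
    (PySem.Int.floordiv a b) * b ≤ a ∧ a < (PySem.Int.floordiv a b + 1) * b :=
  (PySem.Int.floordiv_eq_iff_of_pos hb).mp rfl

theorem burnerLoop1_spec (h o w : Int) :
    burnerLoop1 h o w =
      (h - 2 * max 0 (min (PySem.Int.floordiv h 2) o),
       o - max 0 (min (PySem.Int.floordiv h 2) o),
       w + max 0 (min (PySem.Int.floordiv h 2) o)) := by
  induction h, o, w using burnerLoop1.induct with
  | case1 h o w hc ih =>
    rw [burnerLoop1, if_pos hc, ih]
    have h1 := fdiv_bounds h 2 (by norm_num)
    have h2 := fdiv_bounds (h - 2) 2 (by norm_num)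
    refine Prod.ext ?_ (Prod.ext ?_ ?_) <;> simp <;> omega
  | case2 h o w hc =>
    rw [burnerLoop1, if_neg hc]
    have h1 := fdiv_bounds h 2 (by norm_num)
    refine Prod.ext ?_ (Prod.ext ?_ ?_) <;> simp <;> omega

theorem burnerLoop2_spec (c o w : Int) :
    burnerLoop2 c o w =
      (c - max 0 (min c (PySem.Int.floordiv o 2)),
       o - 2 * max 0 (min c (PySem.Int.floordiv o 2)),
       w + max 0 (min c (PySem.Int.floordiv o 2))) := by
  induction c, o, w using burnerLoop2.induct with
  | case1 c o w hc ih =>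
    rw [burnerLoop2, if_pos hc, ih]
    have h1 := fdiv_bounds o 2 (by norm_num)
    have h2 := fdiv_bounds (o - 2) 2 (by norm_num)
    refine Prod.ext ?_ (Prod.ext ?_ ?_) <;> simp <;> omega
  | case2 c o w hc =>
    rw [burnerLoop2, if_neg hc]
    have h1 := fdiv_bounds o 2 (by norm_num)
    refine Prod.ext ?_ (Prod.ext ?_ ?_) <;> simp <;> omega

theorem burnerLoop3_spec (c h w : Int) :
    burnerLoop3 c h w =
      (c - max 0 (min c (PySem.Int.floordiv h 4)),
       h - 4 * max 0 (min c (PySem.Int.floordiv h 4)),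
       w + max 0 (min c (PySem.Int.floordiv h 4))) := by
  induction c, h, w using burnerLoop3.induct with
  | case1 c h w hc ih =>
    rw [burnerLoop3, if_pos hc, ih]
    have h1 := fdiv_bounds h 4 (by norm_num)
    have h2 := fdiv_bounds (h - 4) 4 (by norm_num)
    refine Prod.ext ?_ (Prod.ext ?_ ?_) <;> simp <;> omega
  | case2 c h w hc =>
    rw [burnerLoop3, if_neg hc]
    have h1 := fdiv_bounds h 4 (by norm_num)
    refine Prod.ext ?_ (Prod.ext ?_ ?_) <;> simp <;> omega

-- ===== VERDICT (by name: the statement is the Claim_ definition above) =====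
theorem burner_spec : Claim_equal_burner := by
  intro c h_ o _
  unfold Spec_burner burner burner_alt
  simp [burnerLoop1_spec, burnerLoop2_spec, burnerLoop3_spec]
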